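-- pv_equiv track=rewrite | github.com/gunba/ato-mcp | src/ato_mcp/indexer/metadata.py | compose_human_title
-- ===== SOURCE A (Python) =====
-- def compose_human_title(headings: list[str] | None) -> str | None:
--     """Join a document's HTML headings (``<h1>``, ``<h2>``, ...) into one string.
--
--     Intended as a first-pass human-readable title for search / display when
--     the extractor's single ``<title>`` tag is uninformative. Returns ``None``
--     when the doc has no headings. Collapses whitespace inside each heading
--     and de-dupes consecutive repeats (ATO templates frequently repeat the
--     top-level title). The main PC is expected to iterate on this heuristic
--     over time; this is only the seed.
--     """
--     if not headings:
--         return None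
--     cleaned: list[str] = []
--     last: str | None = None
--     for raw in headings:
--         if raw is None:
--             continue
--         text = " ".join(raw.split())
--         if not text or text == last:
--             continue
--         cleaned.append(text)
--         last = text
--     if not cleaned:
--         return None
--     return " — ".join(cleaned)
-- ===== SOURCE B (Python) =====
-- def compose_human_title(headings):
--     if not headings:
--         return None
--     cleaned = [t for t in (" ".join(r.split()) for r in headings if r is not None) if t]
--     result = _dedup_consecutive(cleaned)
--     return " — ".join(result) if result else None
--
--
-- def _dedup_consecutive(xs):
--     if not xs:
--         return []
--     return [xs[0]] + [b for a, b in zip(xs, xs[1:]) if b != a]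
-- ===== Notes on version B (the rewrite author's own statement) =====
-- stated objective: simpler
-- what changed: A's single fused loop carrying a running `last` state is split into a clean/filter comprehension pass followed by a separate zip-based consecutive-dedup pass.
import Mathlib
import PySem

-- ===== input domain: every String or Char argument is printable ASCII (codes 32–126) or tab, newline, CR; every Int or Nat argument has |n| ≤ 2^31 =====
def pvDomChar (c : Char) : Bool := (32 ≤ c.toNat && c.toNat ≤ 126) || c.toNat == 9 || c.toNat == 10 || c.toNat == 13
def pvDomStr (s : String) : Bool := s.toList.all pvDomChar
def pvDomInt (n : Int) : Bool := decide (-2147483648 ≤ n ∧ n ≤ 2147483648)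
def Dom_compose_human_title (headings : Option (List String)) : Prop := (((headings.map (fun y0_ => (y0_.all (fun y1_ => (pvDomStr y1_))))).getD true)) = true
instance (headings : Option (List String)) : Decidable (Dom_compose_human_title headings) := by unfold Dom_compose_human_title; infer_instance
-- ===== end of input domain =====

-- B replaces A's single fused loop (running `last` state) by a clean/filter pass followed by a
-- separate zip-based consecutive-dedup pass; objective: simpler decomposition, same cost.

-- ===== PORT A =====
-- single fold carrying (cleaned, last); `raw is None` cannot fire (elements are String)
def compose_human_title (headings : Option (List String)) : Option String :=
  match headings with
  | none => none
  | some hs =>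
    if hs = [] then none
    else
      let st := hs.foldl (fun (st : List String × Option String) raw =>
        let text := PySem.Str.join " " (PySem.Str.split₀ raw)
        if text = "" ∨ some text = st.2 then st
        else (st.1 ++ [text], some text)) ([], none)
      if st.1 = [] then none else some (PySem.Str.join " — " st.1)

-- ===== PORT B =====
-- port of Source B's _dedup_consecutive: [xs[0]] + [b for a, b in zip(xs, xs[1:]) if b != a]
def pvDedupConsecutive (xs : List String) : List String :=
  match xs with
  | [] => []
  | x :: rest => x :: ((xs.zip rest).filter (fun p => p.2 ≠ p.1)).map Prod.snd

def compose_human_title_alt (headings : Option (List String)) : Option String :=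
  match headings with
  | none => none
  | some hs =>
    if hs = [] then none
    else
      let cleaned := (hs.map (fun r => PySem.Str.join " " (PySem.Str.split₀ r))).filter (fun t => t ≠ "")
      let result := pvDedupConsecutive cleaned
      if result = [] then none else some (PySem.Str.join " — " result)

-- ===== PRECONDITION & SPEC =====
def Spec_compose_human_title (headings : Option (List String)) (out : Option String) : Prop := out = compose_human_title_alt headings
instance (headings : Option (List String)) (out : Option String) : Decidable (Spec_compose_human_title headings out) := by unfold Spec_compose_human_title; infer_instance

-- ===== CLAIM (what is proved, stated in full; the proofs are below) =====
def Claim_equal_compose_human_title : Prop := ∀ (headings : Option (List String)), Dom_compose_human_title headings → Spec_compose_human_title headings (compose_human_title headings)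

-- ===== LEMMAS AND PROOFS =====

-- A's loop, reformulated as structural recursion on the cleaned texts
def pvDedupFrom (last : Option String) (xs : List String) : List String :=
  match xs with
  | [] => []
  | t :: rest => if t = "" ∨ some t = last then pvDedupFrom last rest else t :: pvDedupFrom (some t) rest

theorem pvFoldl_eq_dedupFrom (hs : List String) (acc : List String) (last : Option String) :
    (hs.foldl (fun (st : List String × Option String) raw =>
        let text := PySem.Str.join " " (PySem.Str.split₀ raw)
        if text = "" ∨ some text = st.2 then st
        else (st.1 ++ [text], some text)) (acc, last)).1
      = acc ++ pvDedupFrom last (hs.map (fun r => PySem.Str.join " " (PySem.Str.split₀ r))) := by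
  induction hs generalizing acc last with
  | nil => simp [pvDedupFrom]
  | cons h rest ih =>
    simp only [List.foldl_cons, List.map_cons, pvDedupFrom]
    split_ifs with hc
    · exact ih acc last
    · rw [ih]; simp

theorem pvDedupFrom_filter (last : Option String) (xs : List String) :
    pvDedupFrom last xs = pvDedupFrom last (xs.filter (fun t => t ≠ "")) := by
  induction xs generalizing last with
  | nil => rfl
  | cons x rest ih =>
    by_cases hx : x = ""
    · subst hx; simp [pvDedupFrom, ih]
    · simp [pvDedupFrom, hx, ih]

theorem pvDedupFrom_some_eq_zip (xs : List String) (a : String) (h : ∀ t ∈ xs, t ≠ "") :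
    pvDedupFrom (some a) xs = (((a :: xs).zip xs).filter (fun p => p.2 ≠ p.1)).map Prod.snd := by
  induction xs generalizing a with
  | nil => rfl
  | cons x rest ih =>
    have hx : x ≠ "" := h x (by simp)
    have hrest : ∀ t ∈ rest, t ≠ "" := fun t ht => h t (by simp [ht])
    by_cases hxa : x = a
    · subst hxa
      simp [pvDedupFrom, hx, List.zip_cons_cons, ih x hrest]
    · simp [pvDedupFrom, hx, hxa, List.zip_cons_cons, ih x hrest]

theorem pvDedupFrom_none_eq_dedup (xs : List String) (h : ∀ t ∈ xs, t ≠ "") :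
    pvDedupFrom none xs = pvDedupConsecutive xs := by
  cases xs with
  | nil => rfl
  | cons x rest =>
    have hx : x ≠ "" := h x (by simp)
    have hrest : ∀ t ∈ rest, t ≠ "" := fun t ht => h t (by simp [ht])
    simp [pvDedupFrom, pvDedupConsecutive, hx, pvDedupFrom_some_eq_zip rest x hrest]

-- ===== VERDICT (by name: the statement is the Claim_ definition above) =====
theorem compose_human_title_spec : Claim_equal_compose_human_title := by
  intro headings _
  unfold Spec_compose_human_title compose_human_title compose_human_title_alt
  cases headings with
  | none => rfl
  | some hs =>
    by_cases hhs : hs = []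
    · simp [hhs]
    · simp only [hhs, if_false]
      rw [pvFoldl_eq_dedupFrom hs [] none, List.nil_append,
        pvDedupFrom_filter, pvDedupFrom_none_eq_dedup]
      intro t ht
      simpa using (List.mem_filter.mp ht).2
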